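-- pv_equiv track=rewrite | github.com/GMM-rgb/AI_RNN_Model | ai_script.py | build_token_model
-- ===== SOURCE A (Python) =====
-- def split_into_syllables(word):
--     vowels = "aeiouyAEIOUY"
--     syllables = []
--     current = ""
--     for i, ch in enumerate(word):
--         current += ch
--         # Mark syllable boundary when a vowel is found and next character is not a vowel.
--         if ch in vowels and (i + 1 == len(word) or word[i+1] not in vowels):
--             syllables.append(current)
--             current = ""
--     if current:
--         syllables.append(current)
--     return syllables
--
-- def tokenize_text(text):
--     tokens = []
--     words = text.split()  # splitting by whitespace
--     for word in words:
--         sylls = split_into_syllables(word)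
--         tokens.extend(sylls)
--         tokens.append(" ")  # append a delimiter token for word boundary
--     if tokens and tokens[-1] == " ":
--         tokens.pop()
--     return tokens
--
-- def build_token_model(text):
--     """
--     Build a token-based model from text. Each token maps to a list of tokens that follow it.
--     """
--     tokens = tokenize_text(text)
--     model = {}
--     for i in range(len(tokens) - 1):
--         token = tokens[i]
--         next_token = tokens[i + 1]
--         model.setdefault(token, []).append(next_token)
--     return model
-- ===== SOURCE B (Python) =====
-- def build_token_model(text):
--     """
--     Build a token-based model from text. Each token maps to a list of tokens that follow it.
--     Single streaming pass: syllables are emitted as they are found and linked to the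
--     previously emitted token; no intermediate token list is materialized.
--     """
--     vowels = "aeiouyAEIOUY"
--     model = {}
--     prev = None
--     for word in text.split():
--         if prev is not None:
--             model.setdefault(prev, []).append(" ")
--             prev = " "
--         current = ""
--         for i, ch in enumerate(word):
--             current += ch
--             if ch in vowels and (i + 1 == len(word) or word[i + 1] not in vowels):
--                 if prev is not None:
--                     model.setdefault(prev, []).append(current)
--                 prev = current
--                 current = ""
--         if current:
--             if prev is not None:
--                 model.setdefault(prev, []).append(current)
--             prev = current
--     return model
-- ===== Notes on version B (the rewrite author's own statement) =====
-- stated objective: alternative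
-- what changed: B builds the successor map in a single streaming pass, linking each syllable/space token to the previously emitted one as it is produced, instead of materializing the full token list and then scanning it by index in a second pass.
import Mathlib
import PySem

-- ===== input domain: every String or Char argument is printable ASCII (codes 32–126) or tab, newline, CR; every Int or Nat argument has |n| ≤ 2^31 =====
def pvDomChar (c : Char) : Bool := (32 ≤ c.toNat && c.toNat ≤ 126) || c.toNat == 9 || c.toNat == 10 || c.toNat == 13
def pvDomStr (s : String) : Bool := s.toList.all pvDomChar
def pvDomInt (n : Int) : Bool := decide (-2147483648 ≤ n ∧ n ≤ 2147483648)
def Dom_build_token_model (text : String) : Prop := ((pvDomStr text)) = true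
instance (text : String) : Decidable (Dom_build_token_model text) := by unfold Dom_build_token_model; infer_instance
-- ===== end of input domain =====

-- B replaces A's "materialize the full token list, then pairwise index scan" by a single
-- streaming pass that links each emitted token to the previous one (objective: alternative).

-- shared vocabulary of both Pythons ('vowels = "aeiouyAEIOUY"')
def pvVowels : List Char := "aeiouyAEIOUY".toList

-- the syllable-boundary test 'ch in vowels and (i+1 == len(word) or word[i+1] not in vowels)'
-- (identical in both Pythons); word[i+1] via pyGetD is exact: the index is only
-- semantically reached when 0 ≤ i+1 < len(word)
def sylBreak (cs : List Char) (p : Int × Char) : Bool :=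
  decide (p.2 ∈ pvVowels ∧ (p.1 + 1 = (cs.length : Int) ∨ PySem.List.pyGetD cs (p.1 + 1) ' ' ∉ pvVowels))

-- the line 'model.setdefault(token, []).append(next_token)' (identical in both Pythons)
def addS (m : PySem.Dict String (List String)) (k v : String) : PySem.Dict String (List String) :=
  m.modify k [] (· ++ [v])

-- ===== PORT A =====
-- body of the 'for i, ch in enumerate(word)' loop of split_into_syllables
def sylStepA (cs : List Char) (st : List String × String) (p : Int × Char) : List String × String :=
  let current := st.2.push p.2
  if sylBreak cs p then (st.1 ++ [current], "") else (st.1, current)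

def split_into_syllables (word : String) : List String :=
  let cs := word.toList
  let r := (PySem.List.enumerate cs 0).foldl (sylStepA cs) ([], "")
  if r.2 ≠ "" then r.1 ++ [r.2] else r.1

def tokenize_text (text : String) : List String :=
  let tokens := (PySem.Str.split₀ text).foldl (fun t w => (t ++ split_into_syllables w) ++ [" "]) []
  -- 'if tokens and tokens[-1] == " ": tokens.pop()'
  if tokens ≠ [] ∧ tokens.getLast? = some " " then tokens.dropLast else tokens

def build_token_model (text : String) : List (String × List String) :=
  let tokens := tokenize_text text
  -- 'for i in range(len(tokens) - 1)': every i satisfies 0 ≤ i < len(tokens), so the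
  -- Nat range with getD is exact (tokens[i] and tokens[i+1] never raise)
  let model := (List.range (tokens.length - 1)).foldl
    (fun m i => addS m (tokens.getD i "") (tokens.getD (i + 1) "")) PySem.Dict.empty
  model.items

-- ===== PORT B =====
-- 'if prev is not None: model.setdefault(prev, []).append(tok); prev = tok'
def emit (st : PySem.Dict String (List String) × Option String) (tok : String) :
    PySem.Dict String (List String) × Option String :=
  match st.2 with
  | some p => (addS st.1 p tok, some tok)
  | none => (st.1, some tok)

-- body of B's inner 'for i, ch in enumerate(word)' loop (emits each syllable immediately)
def sylStepB (cs : List Char)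
    (st : (PySem.Dict String (List String) × Option String) × String) (p : Int × Char) :
    (PySem.Dict String (List String) × Option String) × String :=
  let current := st.2.push p.2
  if sylBreak cs p then (emit st.1 current, "") else (st.1, current)

-- B's inner 'for i, ch in enumerate(word)' loop plus the trailing 'if current:' emission
def innerScanB (st1 : PySem.Dict String (List String) × Option String) (word : String) :
    PySem.Dict String (List String) × Option String :=
  let cs := word.toList
  let inner := (PySem.List.enumerate cs 0).foldl (sylStepB cs) (st1, "")
  if inner.2 ≠ "" then emit inner.1 inner.2 else inner.1

-- body of B's outer 'for word in text.split()' loop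
def wordStepB (st : PySem.Dict String (List String) × Option String) (word : String) :
    PySem.Dict String (List String) × Option String :=
  let st1 := match st.2 with
    | some p => (addS st.1 p " ", some " ")
    | none => st
  innerScanB st1 word

def build_token_model_alt (text : String) : List (String × List String) :=
  (((PySem.Str.split₀ text).foldl wordStepB (PySem.Dict.empty, none)).1).items

-- ===== PRECONDITION & SPEC =====
def Spec_build_token_model (text : String) (out : List (String × List String)) : Prop := out = build_token_model_alt text
instance (text : String) (out : List (String × List String)) : Decidable (Spec_build_token_model text out) := by unfold Spec_build_token_model; infer_instance

-- ===== CLAIM (what is proved, stated in full; the proofs are below) =====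
def Claim_equal_build_token_model : Prop := ∀ (text : String), Dom_build_token_model text → Spec_build_token_model text (build_token_model text)

-- ===== LEMMAS AND PROOFS =====

-- the pairwise successor fold: fold addS over adjacent pairs of the token list
def pairFold (m : PySem.Dict String (List String)) : List String → PySem.Dict String (List String)
  | [] => m
  | [_] => m
  | a :: b :: r => pairFold (addS m a b) (b :: r)

-- token stream of a word list, with " " separators BETWEEN words (no trailing one)
def interTokens : List String → List String
  | [] => []
  | w :: ws => split_into_syllables w ++ ws.flatMap (fun v => " " :: split_into_syllables v)

-- every word produced by str.split() is nonempty
theorem split₀_go_ne_nil (l cur : List Char) (acc : List (List Char))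
    (hacc : ∀ x ∈ acc, x ≠ []) : ∀ w ∈ PySem.Chars.split₀.go l cur acc, w ≠ [] := by
  induction l generalizing cur acc with
  | nil =>
    intro w hw
    rw [PySem.Chars.split₀.go] at hw
    by_cases hc : cur.isEmpty
    · simp [hc] at hw; exact hacc _ hw
    · simp [hc] at hw
      rcases hw with h | h
      · exact hacc _ h
      · subst h; simpa using fun h' => hc (by simp [h'])
  | cons c rest ih =>
    intro w hw
    rw [PySem.Chars.split₀.go] at hw
    by_cases hs : PySem.Chars.isspace c
    · by_cases hc : cur.isEmpty
      · simp [hs, hc] at hw; exact ih [] acc hacc w hw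
      · simp [hs, hc] at hw
        refine ih [] (cur.reverse :: acc) ?_ w hw
        intro x hx
        rcases List.mem_cons.mp hx with h | h
        · subst h; simpa using fun h' => hc (by simp [h'])
        · exact hacc _ h
    · simp [hs] at hw; exact ih (c :: cur) acc hacc w hw

theorem split₀_ne_empty (s : String) : ∀ w ∈ PySem.Str.split₀ s, w ≠ "" := by
  intro w hw
  have h := split₀_go_ne_nil s.toList [] [] (by simp)
  unfold PySem.Str.split₀ at hw
  simp only [List.mem_map] at hw
  obtain ⟨l, hl, rfl⟩ := hw
  have := h l (by simpa [PySem.Chars.split₀] using hl)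
  intro hc
  exact this (by simpa using congrArg String.toList hc)

-- A's scan accumulates syllables on the left
theorem scanA_acc (cs : List Char) (ps : List (Int × Char)) :
    ∀ (sy : List String) (cur : String),
      ps.foldl (sylStepA cs) (sy, cur)
        = (sy ++ (ps.foldl (sylStepA cs) ([], cur)).1, (ps.foldl (sylStepA cs) ([], cur)).2) := by
  induction ps with
  | nil => intro sy cur; simp
  | cons p ps ih =>
    intro sy cur
    simp only [List.foldl_cons, sylStepA]
    by_cases hb : sylBreak cs p
    · simp only [if_pos hb]
      rw [ih (sy ++ [cur.push p.2]) "", ih ([] ++ [cur.push p.2]) ""]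
      simp
    · simp only [if_neg hb]
      exact ih sy (cur.push p.2)

-- A's scan on a nonempty word produces something
theorem scanA_ne (cs : List Char) (ps : List (Int × Char)) :
    ∀ (sy : List String) (cur : String), (cur ≠ "" ∨ ps ≠ []) →
      (ps.foldl (sylStepA cs) (sy, cur)).1 ≠ [] ∨ (ps.foldl (sylStepA cs) (sy, cur)).2 ≠ "" := by
  induction ps with
  | nil =>
    intro sy cur h
    rcases h with h | h
    · exact Or.inr (by simpa using h)
    · exact absurd rfl h
  | cons p ps ih =>
    intro sy cur _
    simp only [List.foldl_cons, sylStepA]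
    by_cases hb : sylBreak cs p
    · simp only [if_pos hb]
      rcases ps with _ | ⟨q, ps⟩
      · simp
      · rcases ih (sy ++ [cur.push p.2]) "" (Or.inr (by simp)) with h | h
        · exact Or.inl h
        · exact Or.inr h
    · simp only [if_neg hb]
      exact ih sy (cur.push p.2) (Or.inl (fun h => by simpa using congrArg String.toList h))

-- the definition of split_into_syllables, lets unfolded (definitional)
theorem syll_def (w : String) :
    split_into_syllables w =
      (if ((PySem.List.enumerate w.toList 0).foldl (sylStepA w.toList) ([], "")).2 ≠ ""
       then ((PySem.List.enumerate w.toList 0).foldl (sylStepA w.toList) ([], "")).1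
              ++ [((PySem.List.enumerate w.toList 0).foldl (sylStepA w.toList) ([], "")).2]
       else ((PySem.List.enumerate w.toList 0).foldl (sylStepA w.toList) ([], "")).1) := rfl

theorem syll_ne_nil (w : String) (hw : w ≠ "") : split_into_syllables w ≠ [] := by
  have hcs : w.toList ≠ [] := fun h => hw (String.toList_eq_nil_iff.mp h)
  have hps : PySem.List.enumerate w.toList 0 ≠ [] := by
    cases hl : w.toList with
    | nil => exact absurd hl hcs
    | cons c cs => rw [PySem.List.enumerate_cons]; simp
  rw [syll_def]
  rcases scanA_ne w.toList (PySem.List.enumerate w.toList 0) [] "" (Or.inr hps) with h | h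
  · split_ifs <;> simp [h]
  · simp [if_pos h]

-- B's syllable scan = A's syllable scan, with the produced syllables emitted
theorem scanB_eq (cs : List Char) (ps : List (Int × Char)) :
    ∀ (st : PySem.Dict String (List String) × Option String) (cur : String),
      ps.foldl (sylStepB cs) (st, cur)
        = ((ps.foldl (sylStepA cs) ([], cur)).1.foldl emit st, (ps.foldl (sylStepA cs) ([], cur)).2) := by
  induction ps with
  | nil => intro st cur; simp
  | cons p ps ih =>
    intro st cur
    simp only [List.foldl_cons, sylStepA, sylStepB]
    by_cases hb : sylBreak cs p
    · simp only [if_pos hb]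
      rw [ih (emit st (cur.push p.2)) "", scanA_acc cs ps ([] ++ [cur.push p.2]) ""]
      simp
    · simp only [if_neg hb]
      exact ih st (cur.push p.2)

-- one word of B = emitting that word's syllables (with a leading " " if something preceded)
theorem innerScanB_eq (st1 : PySem.Dict String (List String) × Option String) (w : String) :
    innerScanB st1 w = (split_into_syllables w).foldl emit st1 := by
  simp only [innerScanB, scanB_eq, syll_def]
  by_cases h : ((PySem.List.enumerate w.toList 0).foldl (sylStepA w.toList) ([], "")).2 = ""
  · simp [h]
  · simp [h, List.foldl_append]

theorem wordStepB_eq (st : PySem.Dict String (List String) × Option String) (w : String) :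
    wordStepB st w
      = (match st.2 with
          | some _ => " " :: split_into_syllables w
          | none => split_into_syllables w).foldl emit st := by
  obtain ⟨m, prev⟩ := st
  cases prev with
  | none =>
    have h : wordStepB (m, none) w = innerScanB (m, none) w := rfl
    rw [h, innerScanB_eq]
  | some p =>
    have h : wordStepB (m, some p) w = innerScanB (addS m p " ", some " ") w := rfl
    have he : emit (m, some p) " " = (addS m p " ", some " ") := rfl
    rw [h, innerScanB_eq]
    simp only [List.foldl_cons, he]

-- emitting a nonempty token list leaves prev set
theorem emit_snd_some (ts : List String) :
    ∀ (st : PySem.Dict String (List String) × Option String), ts ≠ [] →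
      ∃ q, (ts.foldl emit st).2 = some q := by
  induction ts with
  | nil => intro _ h; exact absurd rfl h
  | cons t ts ih =>
    intro st _
    rcases ts with _ | ⟨u, ts⟩
    · refine ⟨t, ?_⟩
      simp only [List.foldl_cons, List.foldl_nil, emit]
      cases st.2 <;> rfl
    · simp only [List.foldl_cons]
      exact ih _ (by simp)

-- the rest of B's word loop, once prev is set
theorem foldl_wordStepB_some (ws : List String) :
    ∀ (st : PySem.Dict String (List String) × Option String) (p : String), st.2 = some p →
      ws.foldl wordStepB st = (ws.flatMap (fun v => " " :: split_into_syllables v)).foldl emit st := by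
  induction ws with
  | nil => intro st p _; simp
  | cons w ws ih =>
    intro st p hp
    simp only [List.foldl_cons, List.flatMap_cons, List.foldl_append]
    have hw : wordStepB st w = ((" " :: split_into_syllables w).foldl emit st) := by
      rw [wordStepB_eq]; rw [hp]
    rw [hw]
    obtain ⟨q, hq⟩ := emit_snd_some (" " :: split_into_syllables w) st (by simp)
    exact ih _ q hq

-- emit-folding a token list = the pairwise successor fold
theorem emit_foldl_some (ts : List String) :
    ∀ (m : PySem.Dict String (List String)) (p : String),
      (ts.foldl emit (m, some p)).1 = pairFold m (p :: ts) := by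
  induction ts with
  | nil => intro m p; simp [pairFold]
  | cons t ts ih =>
    intro m p
    have : emit (m, some p) t = (addS m p t, some t) := rfl
    simp only [List.foldl_cons, this, ih, pairFold]

theorem emit_foldl_none (ts : List String) (m : PySem.Dict String (List String)) :
    (ts.foldl emit (m, none)).1 = pairFold m ts := by
  cases ts with
  | nil => simp [pairFold]
  | cons t ts =>
    have : emit (m, none) t = (m, some t) := rfl
    simp only [List.foldl_cons, this, emit_foldl_some]

-- B computes pairFold of interTokens
theorem alt_eq_pairFold (text : String) :
    build_token_model_alt text = (pairFold PySem.Dict.empty (interTokens (PySem.Str.split₀ text))).items := by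
  unfold build_token_model_alt
  congr 1
  rcases hws : PySem.Str.split₀ text with _ | ⟨w, ws⟩
  · simp [interTokens, pairFold]
  · have hwne : w ≠ "" := split₀_ne_empty text w (by rw [hws]; exact List.mem_cons_self)
    simp only [List.foldl_cons]
    have h1 : wordStepB (PySem.Dict.empty, none) w
        = (split_into_syllables w).foldl emit (PySem.Dict.empty, none) := by
      rw [wordStepB_eq]
    obtain ⟨q, hq⟩ := emit_snd_some (split_into_syllables w) (PySem.Dict.empty, none)
      (syll_ne_nil w hwne)
    rw [h1, foldl_wordStepB_some ws _ q hq,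
      show interTokens (w :: ws)
          = split_into_syllables w ++ List.flatMap (fun v => " " :: split_into_syllables v) ws from rfl,
      ← List.foldl_append]
    exact emit_foldl_none _ _

-- A's token list, before the pop, is a flatMap
theorem tokens_flatMap (ws : List String) :
    ws.foldl (fun t w => (t ++ split_into_syllables w) ++ [" "]) []
      = ws.flatMap (fun w => split_into_syllables w ++ [" "]) := by
  have h : ws.foldl (fun t w => (t ++ split_into_syllables w) ++ [" "]) []
      = ws.foldl (fun t w => t ++ (split_into_syllables w ++ [" "])) [] := by
    apply PySem.List.foldl_congr_mem
    intro acc x _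
    simp
  rw [h, PySem.List.foldl_append_eq_flatMap]
  simp

theorem flatMap_getLast (ws : List String) (hne : ws ≠ []) :
    (ws.flatMap (fun w => split_into_syllables w ++ [" "])).getLast? = some " " := by
  induction ws with
  | nil => exact absurd rfl hne
  | cons w ws ih =>
    rcases ws with _ | ⟨v, ws⟩
    · simp
    · rw [List.flatMap_cons, List.getLast?_append, ih (by simp)]
      rfl

theorem dropLast_flatMap (ws : List String) :
    ∀ (w : String), (((w :: ws).flatMap (fun v => split_into_syllables v ++ [" "])).dropLast)
      = interTokens (w :: ws) := by
  induction ws with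
  | nil => intro w; simp [interTokens]
  | cons v ws ih =>
    intro w
    have hne : (v :: ws).flatMap (fun u => split_into_syllables u ++ [" "]) ≠ [] := by
      simp only [List.flatMap_cons]
      intro h
      have := congrArg List.getLast? h
      rw [List.getLast?_append] at this
      simp at this
    rw [List.flatMap_cons, List.dropLast_append_of_ne_nil hne, ih v]
    simp [interTokens]

theorem tokenize_eq (text : String) :
    tokenize_text text = interTokens (PySem.Str.split₀ text) := by
  unfold tokenize_text
  rw [tokens_flatMap]
  rcases hws : PySem.Str.split₀ text with _ | ⟨w, ws⟩
  · simp [interTokens]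
  · have hlast := flatMap_getLast (w :: ws) (by simp)
    have hne : (w :: ws).flatMap (fun v => split_into_syllables v ++ [" "]) ≠ [] := by
      intro h; rw [h] at hlast; simp at hlast
    rw [if_pos ⟨hne, hlast⟩, dropLast_flatMap]

-- A's indexed pair loop = the pairwise successor fold
theorem range_pairFold (ts : List String) :
    ∀ (m : PySem.Dict String (List String)),
      (List.range (ts.length - 1)).foldl
        (fun m i => addS m (ts.getD i "") (ts.getD (i + 1) "")) m = pairFold m ts := by
  induction ts with
  | nil => intro m; simp [pairFold]
  | cons a ts ih =>
    intro m
    rcases ts with _ | ⟨b, r⟩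
    · simp [pairFold]
    · have hlen : (a :: b :: r).length - 1 = (r.length + 1) := by simp
      rw [hlen, List.range_succ_eq_map, List.foldl_cons, List.foldl_map]
      simp only [List.getD_cons_zero, List.getD_cons_succ]
      have ih' := ih (addS m a b)
      rw [show (b :: r).length - 1 = r.length by simp] at ih'
      simp only [List.getD_cons_succ] at ih'
      rw [show pairFold m (a :: b :: r) = pairFold (addS m a b) (b :: r) from rfl]
      exact ih'

-- ===== VERDICT (by name: the statement is the Claim_ definition above) =====
theorem build_token_model_spec : Claim_equal_build_token_model := by
  intro text _
  unfold Spec_build_token_model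
  rw [show build_token_model text
      = ((List.range ((tokenize_text text).length - 1)).foldl
          (fun m i => addS m ((tokenize_text text).getD i "") ((tokenize_text text).getD (i + 1) ""))
          PySem.Dict.empty).items from rfl,
    tokenize_eq, range_pairFold, alt_eq_pairFold]
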